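-- pv_equiv track=rewrite | github.com/SuperGalaxy0901/Streamlit-OpenAI-Chatbot | utils/string_util.py | find_positions_multiple
-- ===== SOURCE A (Python) =====
-- def find_positions_multiple(text, start_substring, end_substring):
--     positions = []
--     start_idx = 0
--     while True:
--         start = text.find(start_substring, start_idx)
--         if start == -1:
--             break
--         end = text.find(end_substring, start + len(start_substring))
--         if end == -1:
--             break
--         positions.append((start, end + len(end_substring)))  # Adjust end position to include end_substring
--         start_idx = end + len(end_substring)
--     return positions
-- ===== SOURCE B (Python) =====
-- def find_positions_multiple(text, start_substring, end_substring):
--     # Precompute all occurrence positions of each substring once, then pair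
--     # them with a single merge-style two-pointer scan.
--     n = len(text)
--     starts = [i for i in range(n + 1) if text.startswith(start_substring, i)]
--     ends = [i for i in range(n + 1) if text.startswith(end_substring, i)]
--     positions = []
--     j = 0
--     cur = 0
--     for s in starts:
--         if s < cur:
--             continue
--         while j < len(ends) and ends[j] < s + len(start_substring):
--             j += 1
--         if j == len(ends):
--             break
--         e = ends[j]
--         positions.append((s, e + len(end_substring)))
--         cur = e + len(end_substring)
--     return positions
-- ===== Notes on version B (the rewrite author's own statement) =====
-- stated objective: alternative
-- what changed: Replaced the repeated text.find loop with a precomputation of all occurrence positions of both substrings followed by a single merge-style two-pointer pairing scan.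
import Mathlib
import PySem

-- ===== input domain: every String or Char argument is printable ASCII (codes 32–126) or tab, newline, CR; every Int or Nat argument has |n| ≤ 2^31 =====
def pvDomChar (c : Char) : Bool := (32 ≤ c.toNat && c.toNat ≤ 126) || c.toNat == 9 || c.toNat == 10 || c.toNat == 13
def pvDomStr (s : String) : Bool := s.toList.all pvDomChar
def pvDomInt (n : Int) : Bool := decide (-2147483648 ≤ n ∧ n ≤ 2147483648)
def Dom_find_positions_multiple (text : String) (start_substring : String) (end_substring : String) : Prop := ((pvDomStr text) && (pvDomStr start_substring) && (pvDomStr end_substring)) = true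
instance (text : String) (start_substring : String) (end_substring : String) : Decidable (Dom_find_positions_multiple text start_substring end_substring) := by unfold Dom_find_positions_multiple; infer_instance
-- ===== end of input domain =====

-- ===== PORT A =====
-- B changes: occurrences of both substrings are precomputed once and paired by a
-- merge-style two-pointer scan, instead of A's repeated text.find loop (objective: alternative).
-- A's while-loop, with a fuel guard: when not both substrings are empty, start_idx strictly
-- increases each iteration and stays ≤ len(text), so len(text)+2 iterations always suffice.
def fpmLoopA (text start_substring end_substring : String) :
    Nat → Int → List (Int × Int) → List (Int × Int)
  | 0, _, positions => positions
  | fuel + 1, start_idx, positions =>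
    let start := PySem.Str.findFrom text start_substring start_idx
    if start = -1 then positions
    else
      let e := PySem.Str.findFrom text end_substring (start + PySem.Str.len start_substring)
      if e = -1 then positions
      else
        fpmLoopA text start_substring end_substring fuel (e + PySem.Str.len end_substring)
          (positions ++ [(start, e + PySem.Str.len end_substring)])

def find_positions_multiple (text : String) (start_substring : String) (end_substring : String) : List (Int × Int) :=
  fpmLoopA text start_substring end_substring (text.toList.length + 2) 0 []

-- ===== PORT B =====
-- [i for i in range(len(text)+1) if text.startswith(sub, i)]
-- (text.startswith(sub, i) with 0 ≤ i ≤ len(text) is exactly: sub is a prefix of text[i:])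
def fpmOcc (text sub : String) : List Nat :=
  (List.range (text.toList.length + 1)).filter
    (fun i => PySem.Chars.startswith (text.toList.drop i) sub.toList)

-- the pairing scan: iterate the start positions, skip those before cur, advance the
-- end-position pointer (the j-advancing while loop = dropWhile on the remaining suffix)
def fpmLoopB (lenS lenE : Nat) : List Nat → List Nat → Nat → List (Int × Int)
  | [], _, _ => []
  | s :: ss, ends, cur =>
    if s < cur then fpmLoopB lenS lenE ss ends cur
    else
      match ends.dropWhile (fun e => decide (e < s + lenS)) with
      | [] => []
      | e :: es => ((s : Int), ((e + lenE : Nat) : Int)) :: fpmLoopB lenS lenE ss (e :: es) (e + lenE)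

def find_positions_multiple_alt (text : String) (start_substring : String) (end_substring : String) : List (Int × Int) :=
  fpmLoopB start_substring.toList.length end_substring.toList.length
    (fpmOcc text start_substring) (fpmOcc text end_substring) 0

-- ===== PRECONDITION & SPEC =====
-- Pre_ excludes only the case where BOTH substrings are empty: there Python A never
-- returns (text.find("", i) = i and start_idx never advances, an infinite loop).
def Pre_find_positions_multiple (text : String) (start_substring : String) (end_substring : String) : Prop :=
  ¬ (start_substring = "" ∧ end_substring = "")
instance (text : String) (start_substring : String) (end_substring : String) : Decidable (Pre_find_positions_multiple text start_substring end_substring) := by unfold Pre_find_positions_multiple; infer_instance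

def pvWitness_find_positions_multiple : String × String × String := ("abcab", "a", "b")

def Spec_find_positions_multiple (text : String) (start_substring : String) (end_substring : String) (out : List (Int × Int)) : Prop := out = find_positions_multiple_alt text start_substring end_substring
instance (text : String) (start_substring : String) (end_substring : String) (out : List (Int × Int)) : Decidable (Spec_find_positions_multiple text start_substring end_substring out) := by unfold Spec_find_positions_multiple; infer_instance

-- ===== CLAIM (what is proved, stated in full; the proofs are below) =====
def Claim_equal_find_positions_multiple : Prop := ∀ (text : String) (start_substring : String) (end_substring : String), Dom_find_positions_multiple text start_substring end_substring → Pre_find_positions_multiple text start_substring end_substring → Spec_find_positions_multiple text start_substring end_substring (find_positions_multiple text start_substring end_substring)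

-- ===== LEMMAS AND PROOFS =====

-- positions in fpmOcc are exactly the prefix-match positions ≤ len(text)
lemma fpm_mem_occ (text sub : String) (i : Nat) :
    i ∈ fpmOcc text sub ↔ i ≤ text.toList.length ∧ sub.toList <+: text.toList.drop i := by
  simp [fpmOcc, List.mem_filter, List.mem_range, PySem.Chars.startswith_iff, Nat.lt_succ_iff]

lemma fpm_occ_sorted (text sub : String) : (fpmOcc text sub).Pairwise (· < ·) := by
  exact (List.pairwise_lt_range).filter _

lemma fpm_occ_bound (text sub : String) (i : Nat) (h : i ∈ fpmOcc text sub) :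
    i + sub.toList.length ≤ text.toList.length := by
  rcases (fpm_mem_occ text sub i).1 h with ⟨hle, hpre⟩
  have h2 := hpre.length_le
  rw [List.length_drop] at h2
  omega

-- dropWhile (· < k') after dropWhile (· < k) with k ≤ k' collapses
lemma fpm_dropWhile_dropWhile (l : List Nat) (k k' : Nat) (hk : k ≤ k') :
    (l.dropWhile (fun x => decide (x < k))).dropWhile (fun x => decide (x < k'))
      = l.dropWhile (fun x => decide (x < k')) := by
  induction l with
  | nil => rfl
  | cons x tl ih =>
    by_cases hx : x < k
    · have hx' : x < k' := lt_of_lt_of_le hx hk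
      simp [List.dropWhile_cons, hx, hx', ih]
    · simp [List.dropWhile_cons, hx]

lemma fpm_dropWhile_false (l : List Nat) :
    l.dropWhile (fun _ => false) = l := by
  induction l with
  | nil => rfl
  | cons x tl ih => simp [List.dropWhile_cons]

-- text.find(sub, k) is the head of the occurrence list with positions < k dropped (or -1)
lemma fpm_findFrom_occ (text sub : String) (k : Nat) (hk : k ≤ text.toList.length) :
    PySem.Chars.findFrom text.toList sub.toList (k : Int) none =
      (match (fpmOcc text sub).dropWhile (fun i => decide (i < k)) with
        | [] => (-1 : Int)
        | s :: _ => (s : Int)) := by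
  cases hD : (fpmOcc text sub).dropWhile (fun i => decide (i < k)) with
  | nil =>
    show PySem.Chars.findFrom text.toList sub.toList (k : Int) none = -1
    refine (PySem.Chars.findFrom_natCast_eq_neg_one_iff _ _ k hk).2 ?_
    intro hinf
    have hall : ∀ i ∈ fpmOcc text sub, i < k := by
      intro i hi
      have := List.dropWhile_eq_nil_iff.1 hD i hi
      simpa using this
    obtain ⟨j, hj⟩ := (PySem.Chars.exists_prefix_drop_iff_isIn sub.toList (text.toList.drop k)).2
      ((PySem.Chars.isIn_iff_infix _ _).2 hinf)
    rw [List.drop_drop] at hj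
    by_cases hjk : k + j ≤ text.toList.length
    · have hmem : (k + j) ∈ fpmOcc text sub := (fpm_mem_occ text sub _).2 ⟨hjk, hj⟩
      have := hall _ hmem; omega
    · have hnil : text.toList.drop (k + j) = [] := List.drop_eq_nil_of_le (by omega)
      rw [hnil] at hj
      have hb : sub.toList = [] := List.prefix_nil.1 hj
      have hmem : text.toList.length ∈ fpmOcc text sub :=
        (fpm_mem_occ text sub _).2 ⟨le_refl _, by rw [hb]; exact List.nil_prefix⟩
      have := hall _ hmem; omega
  | cons s rest =>
    show PySem.Chars.findFrom text.toList sub.toList (k : Int) none = (s : Int)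
    have hne : (fpmOcc text sub).dropWhile (fun i => decide (i < k)) ≠ [] := by
      rw [hD]; simp
    have hhead : ¬ (s < k) := by
      have h1 := List.head_dropWhile_not (fun i => decide (i < k)) hne
      have h2 : ((fpmOcc text sub).dropWhile (fun i => decide (i < k))).head hne = s := by
        simp [hD]
      rw [h2] at h1
      simpa using h1
    have hsmem : s ∈ fpmOcc text sub :=
      (List.dropWhile_sublist _).subset (by rw [hD]; exact List.mem_cons_self)
    obtain ⟨hs_le, hs_pre⟩ := (fpm_mem_occ text sub s).1 hsmem
    have hinf : sub.toList <:+: text.toList.drop k := by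
      have hpre2 : sub.toList <+: (text.toList.drop k).drop (s - k) := by
        rw [List.drop_drop]
        have hsk : k + (s - k) = s := by omega
        rw [hsk]; exact hs_pre
      exact (PySem.Chars.isIn_iff_infix _ _).1
        ((PySem.Chars.exists_prefix_drop_iff_isIn _ _).1 ⟨_, hpre2⟩)
    have hne' : PySem.Chars.findFrom text.toList sub.toList (k : Int) none ≠ -1 := by
      intro h0
      exact ((PySem.Chars.findFrom_natCast_eq_neg_one_iff _ _ k hk).1 h0) hinf
    obtain ⟨hkf, hfpre, hmin⟩ := PySem.Chars.findFrom_natCast_spec text.toList sub.toList k hk hne'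
    set f := PySem.Chars.findFrom text.toList sub.toList (k : Int) none with hf
    have hf0 : (0 : Int) ≤ f := le_trans (by exact_mod_cast Nat.zero_le k) hkf
    have hfle : f ≤ (text.toList.length : Int) := by
      have h1 := PySem.Chars.findFrom_natCast text.toList sub.toList k hk
      by_cases hc : PySem.Chars.find (text.toList.drop k) sub.toList = -1
      · exfalso; apply hne'; rw [hf, h1, if_pos hc]
      · have h2 := PySem.Chars.find_le_length (text.toList.drop k) sub.toList
        rw [List.length_drop] at h2
        rw [hf, h1, if_neg hc]
        push_cast
        omega
    have hkf' : k ≤ f.toNat := by omega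
    have hfmem : f.toNat ∈ fpmOcc text sub := (fpm_mem_occ _ _ _).2 ⟨by omega, hfpre⟩
    have hfD : f.toNat ∈ s :: rest := by
      rw [← List.takeWhile_append_dropWhile (p := fun i => decide (i < k))
        (l := fpmOcc text sub)] at hfmem
      rcases List.mem_append.1 hfmem with htk | hdr
      · have := List.mem_takeWhile_imp htk
        simp at this
        omega
      · rwa [hD] at hdr
    have hsf : f.toNat ≤ s := by
      by_contra hlt
      exact hmin s (by omega) (by omega) hs_pre
    have hfs : f.toNat = s := by
      rcases List.mem_cons.1 hfD with heq | hmem2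
      · exact heq
      · exfalso
        have hpw : List.Pairwise (· < ·) (s :: rest) :=
          hD ▸ (List.Pairwise.sublist (List.dropWhile_sublist _) (fpm_occ_sorted text sub))
        have := (List.pairwise_cons.1 hpw).1 _ hmem2
        omega
    calc f = ((f.toNat : Nat) : Int) := (Int.toNat_of_nonneg hf0).symm
      _ = (s : Int) := by rw [hfs]

-- B skips start positions < cur by itself
lemma fpm_skip (lenS lenE : Nat) (l er : List Nat) (cur : Nat) :
    fpmLoopB lenS lenE (l.dropWhile (fun s => decide (s < cur))) er cur
      = fpmLoopB lenS lenE l er cur := by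
  induction l with
  | nil => rfl
  | cons x tl ih =>
    by_cases hx : x < cur
    · simp [List.dropWhile_cons, hx, fpmLoopB, ih]
    · simp [List.dropWhile_cons, hx]

-- the main loop invariant: A resuming at index k equals B's scan over the occurrence
-- suffixes, h bounding the already-consumed end positions
lemma fpm_main (text s1 s2 : String) (hpre : 1 ≤ s1.toList.length + s2.toList.length) :
    ∀ (fuel k h : Nat) (acc : List (Int × Int)),
      k ≤ text.toList.length → h ≤ k → text.toList.length + 2 ≤ fuel + k →
      fpmLoopA text s1 s2 fuel (k : Int) acc =
        acc ++ fpmLoopB s1.toList.length s2.toList.length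
          ((fpmOcc text s1).dropWhile (fun i => decide (i < k)))
          ((fpmOcc text s2).dropWhile (fun i => decide (i < h))) k := by
  intro fuel
  induction fuel with
  | zero =>
    intro k h acc hk hh hfuel
    omega
  | succ fuel ih =>
    intro k h acc hk hh hfuel
    cases hS : (fpmOcc text s1).dropWhile (fun i => decide (i < k)) with
    | nil =>
      have hstart' : PySem.Chars.findFrom text.toList s1.toList (k : Int) none = -1 :=
        (fpm_findFrom_occ text s1 k hk).trans (by rw [hS])
      simp only [fpmLoopA, PySem.Str.findFrom_eq, PySem.Str.len_eq]
      rw [hstart', if_pos rfl]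
      simp [fpmLoopB]
    | cons s ss =>
      have hstart' : PySem.Chars.findFrom text.toList s1.toList (k : Int) none = (s : Int) :=
        (fpm_findFrom_occ text s1 k hk).trans (by rw [hS])
      have hne : (fpmOcc text s1).dropWhile (fun i => decide (i < k)) ≠ [] := by rw [hS]; simp
      have hks : ¬ (s < k) := by
        have h1 := List.head_dropWhile_not (fun i => decide (i < k)) hne
        have h2 : ((fpmOcc text s1).dropWhile (fun i => decide (i < k))).head hne = s := by
          simp [hS]
        rw [h2] at h1
        simpa using h1
      have hsmem : s ∈ fpmOcc text s1 :=
        (List.dropWhile_sublist _).subset (by rw [hS]; exact List.mem_cons_self)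
      have hs_bound : s + s1.toList.length ≤ text.toList.length := fpm_occ_bound _ _ _ hsmem
      have hcomp : ((fpmOcc text s2).dropWhile (fun i => decide (i < h))).dropWhile
            (fun e => decide (e < s + s1.toList.length))
          = (fpmOcc text s2).dropWhile (fun i => decide (i < s + s1.toList.length)) :=
        fpm_dropWhile_dropWhile _ h _ (by omega)
      have hcast1 : ((s : Int) + (s1.toList.length : Int)) = ((s + s1.toList.length : Nat) : Int) := by
        push_cast; ring
      cases hE : (fpmOcc text s2).dropWhile (fun i => decide (i < s + s1.toList.length)) with
      | nil =>
        have hend' : PySem.Chars.findFrom text.toList s2.toList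
            ((s + s1.toList.length : Nat) : Int) none = -1 :=
          (fpm_findFrom_occ text s2 _ hs_bound).trans (by rw [hE])
        simp only [fpmLoopA, PySem.Str.findFrom_eq, PySem.Str.len_eq]
        rw [hstart', if_neg (by omega), hcast1, hend', if_pos rfl]
        simp only [fpmLoopB, if_neg hks]
        rw [hcomp, hE]
        simp
      | cons e es =>
        have hend' : PySem.Chars.findFrom text.toList s2.toList
            ((s + s1.toList.length : Nat) : Int) none = (e : Int) :=
          (fpm_findFrom_occ text s2 _ hs_bound).trans (by rw [hE])
        have hneE : (fpmOcc text s2).dropWhile (fun i => decide (i < s + s1.toList.length)) ≠ [] := by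
          rw [hE]; simp
        have hes : ¬ (e < s + s1.toList.length) := by
          have h1 := List.head_dropWhile_not (fun i => decide (i < s + s1.toList.length)) hneE
          have h2 : ((fpmOcc text s2).dropWhile
              (fun i => decide (i < s + s1.toList.length))).head hneE = e := by
            simp only [hE, List.head_cons]
          rw [h2] at h1
          simpa using h1
        have hemem : e ∈ fpmOcc text s2 :=
          (List.dropWhile_sublist _).subset (by rw [hE]; exact List.mem_cons_self)
        have he_bound : e + s2.toList.length ≤ text.toList.length := fpm_occ_bound _ _ _ hemem
        have hcast2 : ((e : Int) + (s2.toList.length : Int)) = ((e + s2.toList.length : Nat) : Int) := by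
          push_cast; ring
        have hih := ih (e + s2.toList.length) (s + s1.toList.length)
          (acc ++ [((s : Int), ((e + s2.toList.length : Nat) : Int))])
          he_bound (by omega) (by omega)
        have hstarts : (fpmOcc text s1).dropWhile (fun i => decide (i < e + s2.toList.length))
            = ss.dropWhile (fun i => decide (i < e + s2.toList.length)) := by
          rw [← fpm_dropWhile_dropWhile (fpmOcc text s1) k (e + s2.toList.length) (by omega), hS,
            List.dropWhile_cons]
          simp only [decide_eq_true_eq,
            if_pos (show s < e + s2.toList.length by omega)]
        simp only [fpmLoopA, PySem.Str.findFrom_eq, PySem.Str.len_eq]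
        rw [hstart', if_neg (by omega), hcast1, hend', if_neg (by omega), hcast2, hih, hstarts,
          fpm_skip]
        simp only [fpmLoopB, if_neg hks]
        rw [hcomp, hE]
        simp

lemma fpm_pre_len (s1 s2 : String) (hpre : ¬ (s1 = "" ∧ s2 = "")) :
    1 ≤ s1.toList.length + s2.toList.length := by
  by_contra hlen
  have h1 : s1.toList = [] := List.length_eq_zero_iff.1 (by omega)
  have h2 : s2.toList = [] := List.length_eq_zero_iff.1 (by omega)
  refine hpre ⟨?_, ?_⟩
  · have h3 := congrArg String.ofList h1
    rw [String.ofList_toList] at h3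
    exact h3.trans (by decide)
  · have h3 := congrArg String.ofList h2
    rw [String.ofList_toList] at h3
    exact h3.trans (by decide)

-- ===== VERDICT (by name: the statement is the Claim_ definition above) =====
theorem find_positions_multiple_spec : Claim_equal_find_positions_multiple := by
  intro text s1 s2 _hdom hpre
  unfold Spec_find_positions_multiple find_positions_multiple find_positions_multiple_alt
  have h := fpm_main text s1 s2 (fpm_pre_len s1 s2 hpre) (text.toList.length + 2) 0 0 []
    (by omega) (by omega) (by omega)
  simpa [fpm_dropWhile_false] using h
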